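-- pv_equiv track=rewrite | github.com/rattadduhee/algorithm-study | 프로그래머스/완전탐색/모의고사_1105.py | solution
-- ===== SOURCE A (Python) =====
-- def solution(answers):
--     answer = []
--     ans = {1:[1, 2, 3, 4, 5], 2:[2, 1, 2, 3, 2, 4, 2, 5], 3:[3, 3, 1, 1, 2, 2, 4, 4, 5, 5]}
--     correct = [0,0,0]
--
--     for i in ans:
--         l = len(ans[i])
--         for j in range(0,len(answers),l):
--             if j+l > len(answers):
--                 temp = answers[j:]
--             else:
--                 temp = answers[j:j+l]
--
--             for k in range(len(temp)):
--                 if ans[i][k] == temp[k]: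
--                     correct[i-1] += 1
--     for i in range(len(correct)):
--         if correct[i] == max(correct):
--             answer.append(i+1)
--     answer.sort()
--     return answer
-- ===== SOURCE B (Python) =====
-- def solution(answers):
--     patterns = [[1, 2, 3, 4, 5],
--                 [2, 1, 2, 3, 2, 4, 2, 5],
--                 [3, 3, 1, 1, 2, 2, 4, 4, 5, 5]]
--     scores = [sum(1 for i, a in enumerate(answers) if a == p[i % len(p)])
--               for p in patterns]
--     best = max(scores)
--     return [k + 1 for k in range(3) if scores[k] == best]
-- ===== Notes on version B (the rewrite author's own statement) =====
-- stated objective: simpler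
-- what changed: A iterates per pattern, slicing answers into pattern-length chunks and scanning each chunk; B makes a single enumerate pass over answers, scoring each pattern by modular indexing (a == p[i % len(p)]), then picks the maximal scores.
import Mathlib
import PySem

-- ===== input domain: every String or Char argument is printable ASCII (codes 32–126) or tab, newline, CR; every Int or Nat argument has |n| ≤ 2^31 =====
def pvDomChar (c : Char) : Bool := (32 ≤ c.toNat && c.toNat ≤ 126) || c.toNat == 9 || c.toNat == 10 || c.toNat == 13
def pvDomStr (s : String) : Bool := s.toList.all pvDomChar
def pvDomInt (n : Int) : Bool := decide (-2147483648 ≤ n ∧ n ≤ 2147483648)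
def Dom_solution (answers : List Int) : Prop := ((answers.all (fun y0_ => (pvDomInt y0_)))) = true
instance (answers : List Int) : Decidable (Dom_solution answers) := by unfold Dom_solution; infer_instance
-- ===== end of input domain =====

-- B replaces A's chunk-slicing triple loop by a single enumerate pass with modular pattern
-- indexing (objective: simpler); return-value equivalence (A mutates nothing observable).

-- ===== PORT A =====
-- A-side helper: the dict literal ans = {1: …, 2: …, 3: …}
def ansDict : PySem.Dict Int (List Int) :=
  ((PySem.Dict.empty.insert 1 [1, 2, 3, 4, 5]).insert 2 [2, 1, 2, 3, 2, 4, 2, 5]).insert 3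
    [3, 3, 1, 1, 2, 2, 4, 4, 5, 5]

def solution (answers : List Int) : List Int :=
  let answer : List Int := []
  let ans := ansDict
  let correct : List Int := [0, 0, 0]
  let correct := (PySem.Dict.keys ans).foldl (fun correct i =>
    let ansi := (PySem.Dict.get? ans i).getD []   -- ans[i]; every key of ans is present
    let l := PySem.List.len ansi
    (PySem.List.pyRange 0 (PySem.List.len answers) l).foldl (fun correct j =>
      let temp := if j + l > PySem.List.len answers
        then PySem.List.slice answers (some j) none
        else PySem.List.slice answers (some j) (some (j + l))
      (PySem.List.pyRange 0 (PySem.List.len temp) 1).foldl (fun correct k =>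
        if PySem.List.pyGetD ansi k 0 = PySem.List.pyGetD temp k 0
          then PySem.List.pySetD correct (i - 1) (PySem.List.pyGetD correct (i - 1) 0 + 1)
          else correct) correct) correct) correct
  let answer := (PySem.List.pyRange 0 (PySem.List.len correct) 1).foldl (fun answer i =>
    if PySem.List.pyGetD correct i 0 = (PySem.List.max? correct (fun x => x)).getD 0
      then answer ++ [i + 1] else answer) answer
  PySem.List.sorted answer (fun x => x) false

-- ===== PORT B =====
def solution_alt (answers : List Int) : List Int :=
  let patterns : List (List Int) :=
    [[1, 2, 3, 4, 5], [2, 1, 2, 3, 2, 4, 2, 5], [3, 3, 1, 1, 2, 2, 4, 4, 5, 5]]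
  let scores := patterns.map (fun p =>
    (PySem.List.enumerate answers 0).foldl (fun c ia =>
      if ia.2 = PySem.List.pyGetD p (PySem.Int.mod ia.1 (PySem.List.len p)) 0
        then c + 1 else c) 0)
  let best : Int := (PySem.List.max? scores (fun x => x)).getD 0
  (PySem.List.pyRange 0 3 1).foldl (fun acc k =>
    if PySem.List.pyGetD scores k 0 = best then acc ++ [k + 1] else acc) ([] : List Int)

-- ===== PRECONDITION & SPEC =====
def Spec_solution (answers : List Int) (out : List Int) : Prop := out = solution_alt answers
instance (answers : List Int) (out : List Int) : Decidable (Spec_solution answers out) := by unfold Spec_solution; infer_instance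

-- ===== CLAIM (what is proved, stated in full; the proofs are below) =====
def Claim_equal_solution : Prop := ∀ (answers : List Int), Dom_solution answers → Spec_solution answers (solution answers)

-- ===== LEMMAS AND PROOFS =====

-- number of positions where the cyclic repetition of pattern p (read from offset k) matches xs
def cnt (p : List Int) (k : Nat) : List Int → Int
  | [] => 0
  | x :: t => (if x = p.getD (k % p.length) 0 then 1 else 0) + cnt p (k + 1) t

-- elementwise match count of a pattern prefix against a chunk
def mcAux : List Int → List Int → Int
  | _, [] => 0
  | [], _ :: _ => 0
  | a :: qs, x :: ts => (if a = x then 1 else 0) + mcAux qs ts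

lemma pySetD_self (cor : List Int) (idx : Int) (h0 : 0 ≤ idx) (hlt : idx < (cor.length : Int)) :
    PySem.List.pySetD cor idx (PySem.List.pyGetD cor idx 0) = cor := by
  rw [PySem.List.pySetD_of_nonneg _ _ h0, PySem.List.pyGetD_eq_getElem _ _ h0 hlt]
  exact List.set_getElem_self (by omega)

lemma pyGetD_pySetD_self (cor : List Int) (idx v : Int) (h0 : 0 ≤ idx)
    (hlt : idx < (cor.length : Int)) :
    PySem.List.pyGetD (PySem.List.pySetD cor idx v) idx 0 = v := by
  rw [PySem.List.pySetD_of_nonneg _ _ h0,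
    PySem.List.pyGetD_eq_getElem _ _ h0 (by simpa using hlt)]
  rw [List.getElem_set]
  simp

lemma pySetD_pySetD_self (cor : List Int) (idx v w : Int) (h0 : 0 ≤ idx) :
    PySem.List.pySetD (PySem.List.pySetD cor idx v) idx w = PySem.List.pySetD cor idx w := by
  simp only [PySem.List.pySetD_of_nonneg _ _ h0, List.set_set]

-- a congruence for foldl that carries an invariant of the accumulator
lemma foldl_congr_inv {α β : Type} (P : β → Prop) :
    ∀ (l : List α) (f g : β → α → β) (init : β), P init →
      (∀ acc x, P acc → x ∈ l → f acc x = g acc x) →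
      (∀ acc x, P acc → P (g acc x)) →
      l.foldl f init = l.foldl g init := by
  intro l
  induction l with
  | nil => intro f g init _ _ _; rfl
  | cons y t IH =>
    intro f g init hP hfg hPg
    simp only [List.foldl_cons]
    rw [hfg init y hP (by simp)]
    exact IH f g _ (hPg init y hP) (fun acc x ha hx => hfg acc x ha (by simp [hx])) hPg

-- the inner k-loop bumps slot idx once per elementwise match
lemma inner_fold_nat (t : List Int) : ∀ (q : List Int), t.length ≤ q.length →
    ∀ (idx : Int) (cor : List Int), 0 ≤ idx → idx < (cor.length : Int) →
    (List.range t.length).foldl (fun cor k =>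
        if q.getD k 0 = t.getD k 0
          then PySem.List.pySetD cor idx (PySem.List.pyGetD cor idx 0 + 1) else cor) cor
    = PySem.List.pySetD cor idx (PySem.List.pyGetD cor idx 0 + mcAux q t) := by
  induction t with
  | nil =>
    intro q _ idx cor h0 hlt
    cases q <;> simp [mcAux, pySetD_self cor idx h0 hlt]
  | cons x ts IH =>
    intro q ht idx cor h0 hlt
    cases q with
    | nil => simp at ht
    | cons a qs =>
      simp only [List.length_cons] at ht ⊢
      rw [List.range_succ_eq_map, List.foldl_cons, List.foldl_map]
      simp only [List.getD_cons_zero, Nat.succ_eq_add_one, List.getD_cons_succ]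
      by_cases hax : a = x
      · rw [if_pos hax,
          IH qs (by omega) idx _ h0 (by rw [PySem.List.length_pySetD]; exact hlt),
          pyGetD_pySetD_self cor idx _ h0 hlt, pySetD_pySetD_self cor idx _ _ h0]
        simp only [mcAux, if_pos hax]
        congr 1
        ring
      · rw [if_neg hax, IH qs (by omega) idx cor h0 hlt]
        simp only [mcAux, if_neg hax]
        congr 1
        ring

lemma inner_fold_eq (q t : List Int) (ht : t.length ≤ q.length) (idx : Int) (cor : List Int)
    (h0 : 0 ≤ idx) (hlt : idx < (cor.length : Int)) :
    (PySem.List.pyRange 0 (PySem.List.len t) 1).foldl (fun cor k =>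
        if PySem.List.pyGetD q k 0 = PySem.List.pyGetD t k 0
          then PySem.List.pySetD cor idx (PySem.List.pyGetD cor idx 0 + 1) else cor) cor
    = PySem.List.pySetD cor idx (PySem.List.pyGetD cor idx 0 + mcAux q t) := by
  rw [PySem.List.pyRange_one, List.foldl_map]
  simp only [PySem.List.len_eq, sub_zero, Int.toNat_natCast, zero_add,
    PySem.List.pyGetD_natCast]
  exact inner_fold_nat t q ht idx cor h0 hlt

-- a fold of pure bumps of slot idx adds the total
lemma foldl_bump {γ : Type} (L : List γ) (m : γ → Int) (idx : Int) : ∀ (cor : List Int),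
    0 ≤ idx → idx < (cor.length : Int) →
    L.foldl (fun c x => PySem.List.pySetD c idx (PySem.List.pyGetD c idx 0 + m x)) cor
    = PySem.List.pySetD cor idx (PySem.List.pyGetD cor idx 0 + (L.map m).sum) := by
  induction L with
  | nil => intro cor h0 hlt; simp [pySetD_self cor idx h0 hlt]
  | cons y L IH =>
    intro cor h0 hlt
    rw [List.foldl_cons, IH _ h0 (by rw [PySem.List.length_pySetD]; exact hlt),
      pyGetD_pySetD_self cor idx _ h0 hlt, pySetD_pySetD_self cor idx _ _ h0]
    simp only [List.map_cons, List.sum_cons]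
    congr 1
    ring

lemma cnt_add_len (p : List Int) : ∀ (xs : List Int) (k : Nat),
    cnt p (k + p.length) xs = cnt p k xs := by
  intro xs
  induction xs with
  | nil => intro k; simp [cnt]
  | cons x t IH =>
    intro k
    simp only [cnt, Nat.add_mod_right]
    rw [show k + p.length + 1 = (k + 1) + p.length by omega, IH (k + 1)]

lemma cnt_split (p : List Int) : ∀ (xs : List Int) (j : Nat), j ≤ p.length →
    cnt p j xs
    = mcAux (p.drop j) (xs.take (p.length - j)) + cnt p p.length (xs.drop (p.length - j)) := by
  intro xs
  induction xs with
  | nil =>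
    intro j hj
    cases p.drop j <;> simp [cnt, mcAux]
  | cons x t IH =>
    intro j hj
    by_cases hje : j = p.length
    · subst hje
      simp [cnt, mcAux, List.drop_length]
    · have hjlt : j < p.length := by omega
      have hm : p.length - j = (p.length - (j + 1)) + 1 := by omega
      rw [hm]
      simp only [cnt, Nat.mod_eq_of_lt hjlt, List.take_succ_cons, List.drop_succ_cons]
      rw [List.drop_eq_getElem_cons hjlt]
      simp only [mcAux]
      rw [IH (j + 1) (by omega), List.getD_eq_getElem p 0 hjlt]
      have : (if x = p[j] then (1:Int) else 0) = (if p[j] = x then 1 else 0) := by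
        simp [eq_comm]
      rw [this]
      ring

lemma pyRange_pos_step_cons (n l : Int) (hl : 0 < l) (hn : 0 < n) :
    PySem.List.pyRange 0 n l = 0 :: (PySem.List.pyRange 0 (n - l) l).map (· + l) := by
  rw [PySem.List.pyRange_of_pos _ _ hl, PySem.List.pyRange_of_pos _ _ hl]
  simp only [sub_zero, zero_add, if_pos hn]
  have hed : 0 ≤ (n - 1) / l := Int.ediv_nonneg (by omega) (le_of_lt hl)
  have e1 : n + l - 1 = (n - 1) + 1 * l := by ring
  have e2 : (n + l - 1) / l = (n - 1) / l + 1 := by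
    rw [e1, Int.add_mul_ediv_right _ _ (ne_of_gt hl)]
  have e3 : (if 0 < n - l then ((n - l + l - 1) / l).toNat else 0) = ((n - 1) / l).toNat := by
    split_ifs with h
    · have : n - l + l - 1 = n - 1 := by ring
      rw [this]
    · have h0 : (n - 1) / l = 0 := Int.ediv_eq_zero_of_lt (by omega) (by omega)
      simp [h0]
  rw [e2, e3, show ((n - 1) / l + 1).toNat = ((n - 1) / l).toNat + 1 by omega,
    List.range_succ_eq_map]
  simp only [List.map_cons, List.map_map, Nat.cast_zero, mul_zero]
  congr 1
  apply List.map_congr_left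
  intro k _
  simp only [Function.comp_apply]
  push_cast
  ring

lemma chunk_sum (p : List Int) (hl : 0 < p.length) : ∀ (xs : List Int),
    ((PySem.List.pyRange 0 (PySem.List.len xs) (p.length : Int)).map
        (fun j => mcAux p ((xs.drop j.toNat).take p.length))).sum = cnt p 0 xs := by
  have hl' : (0 : Int) < (p.length : Int) := by exact_mod_cast hl
  have H : ∀ (n : Nat) (xs : List Int), xs.length ≤ n →
      ((PySem.List.pyRange 0 (PySem.List.len xs) (p.length : Int)).map
          (fun j => mcAux p ((xs.drop j.toNat).take p.length))).sum = cnt p 0 xs := by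
    intro n
    induction n with
    | zero =>
      intro xs hxs
      have : xs = [] := List.eq_nil_of_length_eq_zero (by omega)
      subst this
      simp [cnt, PySem.List.len_eq, PySem.List.pyRange_of_pos _ _ hl']
    | succ n IH =>
      intro xs hxs
      by_cases hx : xs.length = 0
      · have : xs = [] := List.eq_nil_of_length_eq_zero hx
        subst this
        simp [cnt, PySem.List.len_eq, PySem.List.pyRange_of_pos _ _ hl']
      · have hn' : (0 : Int) < PySem.List.len xs := by
          rw [PySem.List.len_eq]; exact_mod_cast Nat.pos_of_ne_zero hx
        rw [pyRange_pos_step_cons _ _ hl' hn']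
        simp only [List.map_cons, List.sum_cons, Int.toNat_zero, List.drop_zero, List.map_map]
        have hmc : ∀ j ∈ PySem.List.pyRange 0 (PySem.List.len xs - (p.length : Int))
            (p.length : Int),
            ((fun j => mcAux p ((xs.drop j.toNat).take p.length)) ∘ (· + (p.length : Int))) j
            = mcAux p (((xs.drop p.length).drop j.toNat).take p.length) := by
          intro j hj
          have h0j : 0 ≤ j := ((PySem.List.mem_pyRange_iff_of_pos hl' j).mp hj).1
          simp only [Function.comp_apply]
          rw [List.drop_drop, show (j + (p.length : Int)).toNat = j.toNat + p.length by omega,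
            Nat.add_comm j.toNat p.length]
        rw [List.map_congr_left hmc]
        have hRange : PySem.List.pyRange 0 (PySem.List.len xs - (p.length : Int))
            (p.length : Int)
            = PySem.List.pyRange 0 (PySem.List.len (xs.drop p.length)) (p.length : Int) := by
          by_cases hc : p.length ≤ xs.length
          · congr 1
            simp only [PySem.List.len_eq, List.length_drop]
            omega
          · rw [PySem.List.pyRange_of_pos _ _ hl', PySem.List.pyRange_of_pos _ _ hl',
              if_neg (by simp only [PySem.List.len_eq]; omega),
              if_neg (by simp only [PySem.List.len_eq, List.length_drop]; omega)]
        rw [hRange, IH (xs.drop p.length) (by simp only [List.length_drop]; omega)]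
        have hs := cnt_split p xs 0 (by omega)
        simp only [List.drop_zero, Nat.sub_zero] at hs
        have h2 := cnt_add_len p (xs.drop p.length) 0
        rw [Nat.zero_add] at h2
        rw [hs, h2]
  intro xs
  exact H xs.length xs le_rfl

-- A's whole per-pattern loop nest bumps slot idx by the cyclic match count
lemma key_fold (p : List Int) (hl : 0 < p.length) (xs : List Int) (idx : Int) (cor : List Int)
    (h0 : 0 ≤ idx) (hlt : idx < (cor.length : Int)) :
    (PySem.List.pyRange 0 (PySem.List.len xs) (PySem.List.len p)).foldl (fun cor j =>
      (PySem.List.pyRange 0 (PySem.List.len (if j + PySem.List.len p > PySem.List.len xs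
            then PySem.List.slice xs (some j) none
            else PySem.List.slice xs (some j) (some (j + PySem.List.len p)))) 1).foldl
        (fun cor k =>
          if PySem.List.pyGetD p k 0
              = PySem.List.pyGetD (if j + PySem.List.len p > PySem.List.len xs
                  then PySem.List.slice xs (some j) none
                  else PySem.List.slice xs (some j) (some (j + PySem.List.len p))) k 0
            then PySem.List.pySetD cor idx (PySem.List.pyGetD cor idx 0 + 1) else cor) cor) cor
    = PySem.List.pySetD cor idx (PySem.List.pyGetD cor idx 0 + cnt p 0 xs) := by
  have hl' : (0 : Int) < (p.length : Int) := by exact_mod_cast hl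
  have hlp : PySem.List.len p = (p.length : Int) := PySem.List.len_eq p
  refine Eq.trans (foldl_congr_inv (fun c => c.length = cor.length) _ _
    (fun cor j => PySem.List.pySetD cor idx (PySem.List.pyGetD cor idx 0
      + mcAux p ((xs.drop j.toNat).take p.length))) cor rfl ?_ ?_) ?_
  · intro acc j hacc hj
    have h0j : 0 ≤ j := by
      rw [hlp] at hj
      exact ((PySem.List.mem_pyRange_iff_of_pos hl' j).mp hj).1
    have hacc' : idx < (acc.length : Int) := by rw [hacc]; exact hlt
    by_cases hbr : j + PySem.List.len p > PySem.List.len xs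
    · simp only [if_pos hbr]
      rw [PySem.List.slice_from xs h0j]
      have hlen : (xs.drop j.toNat).length ≤ p.length := by
        rw [hlp, PySem.List.len_eq] at hbr
        simp only [List.length_drop]
        omega
      rw [inner_fold_eq p _ hlen idx acc h0 hacc', List.take_of_length_le hlen]
    · simp only [if_neg hbr]
      rw [PySem.List.slice_toNat xs h0j (by rw [hlp]; omega),
        show (j + PySem.List.len p).toNat - j.toNat = p.length by rw [hlp]; omega]
      have hlen2 : ((xs.drop j.toNat).take p.length).length ≤ p.length := by
        simp only [List.length_take]
        omega
      rw [inner_fold_eq p _ hlen2 idx acc h0 hacc']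
  · intro acc j hacc
    simp only [PySem.List.length_pySetD, hacc]
  · rw [foldl_bump (PySem.List.pyRange 0 (PySem.List.len xs) (PySem.List.len p))
      (fun j => mcAux p ((xs.drop j.toNat).take p.length)) idx cor h0 hlt]
    congr 2
    rw [hlp]
    exact chunk_sum p hl xs

-- B's enumerate pass computes the same cyclic match count
lemma enum_fold (p : List Int) : ∀ (xs : List Int) (s : Nat) (c : Int),
    (PySem.List.enumerate xs (s : Int)).foldl (fun c ia =>
        if ia.2 = PySem.List.pyGetD p (PySem.Int.mod ia.1 (PySem.List.len p)) 0
          then c + 1 else c) c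
    = c + cnt p s xs := by
  intro xs
  induction xs with
  | nil => intro s c; simp [PySem.List.enumerate_nil, cnt]
  | cons x t IH =>
    intro s c
    rw [PySem.List.enumerate_cons, List.foldl_cons,
      show ((s : Int) + 1) = ((s + 1 : Nat) : Int) by push_cast; ring,
      IH (s + 1) _]
    simp only [PySem.List.len_eq, PySem.Int.mod_natCast, PySem.List.pyGetD_natCast, cnt]
    split_ifs <;> ring

-- evaluating the three literal bumps of the counter list
lemma upd0 (X : Int) :
    PySem.List.pySetD [0, 0, 0] (1 - 1) (PySem.List.pyGetD [0, 0, 0] (1 - 1) 0 + X)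
    = [X, 0, 0] := by
  show PySem.List.pySetD [0, 0, 0] 0 (0 + X) = [X, 0, 0]
  rw [zero_add]
  rfl

lemma upd1 (C1 X : Int) :
    PySem.List.pySetD [C1, 0, 0] (2 - 1) (PySem.List.pyGetD [C1, 0, 0] (2 - 1) 0 + X)
    = [C1, X, 0] := by
  show PySem.List.pySetD [C1, 0, 0] 1 (0 + X) = [C1, X, 0]
  rw [zero_add]
  rfl

lemma upd2 (C1 C2 X : Int) :
    PySem.List.pySetD [C1, C2, 0] (3 - 1) (PySem.List.pyGetD [C1, C2, 0] (3 - 1) 0 + X)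
    = [C1, C2, X] := by
  show PySem.List.pySetD [C1, C2, 0] 2 (0 + X) = [C1, C2, X]
  rw [zero_add]
  rfl

-- the two tails agree once the three counters agree
lemma tail_eq (c1 c2 c3 : Int) :
    PySem.List.sorted
      ((PySem.List.pyRange 0 (PySem.List.len [c1, c2, c3]) 1).foldl (fun ans i =>
        if PySem.List.pyGetD [c1, c2, c3] i 0
            = (PySem.List.max? [c1, c2, c3] (fun x => x)).getD 0
          then ans ++ [i + 1] else ans) []) (fun x => x) false
    = (PySem.List.pyRange 0 3 1).foldl (fun acc k =>
        if PySem.List.pyGetD [c1, c2, c3] k 0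
            = (PySem.List.max? [c1, c2, c3] (fun x => x)).getD 0
          then acc ++ [k + 1] else acc) ([] : List Int) := by
  have h3 : PySem.List.len [c1, c2, c3] = 3 := rfl
  have hr : PySem.List.pyRange 0 3 1 = [0, 1, 2] := by decide
  rw [h3, hr]
  simp only [List.foldl_cons, List.foldl_nil]
  have g0 : PySem.List.pyGetD [c1, c2, c3] 0 0 = c1 := rfl
  have g1 : PySem.List.pyGetD [c1, c2, c3] 1 0 = c2 := rfl
  have g2 : PySem.List.pyGetD [c1, c2, c3] 2 0 = c3 := rfl
  rw [g0, g1, g2, PySem.List.max?_id_cons]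
  simp only [Option.getD_some, List.foldl_cons, List.foldl_nil]
  split_ifs <;> decide

-- ===== VERDICT (by name: the statement is the Claim_ definition above) =====
theorem solution_spec : Claim_equal_solution := by
  intro answers _
  unfold Spec_solution
  show solution answers = solution_alt answers
  simp only [solution, solution_alt]
  have hkeys : PySem.Dict.keys ansDict = [1, 2, 3] := by decide
  have hg1 : (PySem.Dict.get? ansDict 1).getD [] = [1, 2, 3, 4, 5] := by decide
  have hg2 : (PySem.Dict.get? ansDict 2).getD [] = [2, 1, 2, 3, 2, 4, 2, 5] := by decide
  have hg3 : (PySem.Dict.get? ansDict 3).getD [] = [3, 3, 1, 1, 2, 2, 4, 4, 5, 5] := by decide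
  rw [hkeys]
  simp only [List.foldl_cons, List.foldl_nil, List.map_cons, List.map_nil]
  simp only [hg1, hg2, hg3]
  rw [key_fold [1, 2, 3, 4, 5] (by norm_num) answers (1 - 1) [0, 0, 0]
    (by norm_num) (by norm_num), upd0]
  rw [key_fold [2, 1, 2, 3, 2, 4, 2, 5] (by norm_num) answers (2 - 1)
    [cnt [1, 2, 3, 4, 5] 0 answers, 0, 0] (by norm_num) (by norm_num), upd1]
  rw [key_fold [3, 3, 1, 1, 2, 2, 4, 4, 5, 5] (by norm_num) answers (3 - 1)
    [cnt [1, 2, 3, 4, 5] 0 answers, cnt [2, 1, 2, 3, 2, 4, 2, 5] 0 answers, 0]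
    (by norm_num) (by norm_num), upd2]
  have e1 := enum_fold [1, 2, 3, 4, 5] answers 0 0
  have e2 := enum_fold [2, 1, 2, 3, 2, 4, 2, 5] answers 0 0
  have e3 := enum_fold [3, 3, 1, 1, 2, 2, 4, 4, 5, 5] answers 0 0
  simp only [Nat.cast_zero, zero_add] at e1 e2 e3
  simp only [e1, e2, e3]
  exact tail_eq _ _ _
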